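-- pv_equiv track=rewrite | github.com/Fioy-01/Dissertation | mis_fever/code3/bert_vagery_runner.py | majority_minority_classes
-- ===== SOURCE A (Python) =====
-- from typing import List, Dict, Tuple, Optional
--
-- def majority_minority_classes(counts: Dict[str, int]):
--     if not counts:
--         return [], []
--     min_cnt = min(counts.values())
--     max_cnt = max(counts.values())
--     mins = [k for k, v in counts.items() if v == min_cnt]
--     maxs = [k for k, v in counts.items() if v == max_cnt]
--     return mins, maxs
-- ===== SOURCE B (Python) =====
-- def majority_minority_classes(counts):
--     it = iter(counts.items())
--     first = next(it, None)
--     if first is None: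
--         return [], []
--     k0, v0 = first
--     min_cnt = max_cnt = v0
--     mins = [k0]
--     maxs = [k0]
--     for k, v in it:
--         if v < min_cnt:
--             min_cnt = v
--             mins = [k]
--         elif v == min_cnt:
--             mins.append(k)
--         if v > max_cnt:
--             max_cnt = v
--             maxs = [k]
--         elif v == max_cnt:
--             maxs.append(k)
--     return mins, maxs
-- ===== Notes on version B (the rewrite author's own statement) =====
-- stated objective: alternative
-- what changed: Replaced the four passes (min, max, and two filtering comprehensions) with one loop over the items that maintains the running min/max counts and the key lists, resetting a list on a strict new extreme and appending on a tie.
import Mathlib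
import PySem

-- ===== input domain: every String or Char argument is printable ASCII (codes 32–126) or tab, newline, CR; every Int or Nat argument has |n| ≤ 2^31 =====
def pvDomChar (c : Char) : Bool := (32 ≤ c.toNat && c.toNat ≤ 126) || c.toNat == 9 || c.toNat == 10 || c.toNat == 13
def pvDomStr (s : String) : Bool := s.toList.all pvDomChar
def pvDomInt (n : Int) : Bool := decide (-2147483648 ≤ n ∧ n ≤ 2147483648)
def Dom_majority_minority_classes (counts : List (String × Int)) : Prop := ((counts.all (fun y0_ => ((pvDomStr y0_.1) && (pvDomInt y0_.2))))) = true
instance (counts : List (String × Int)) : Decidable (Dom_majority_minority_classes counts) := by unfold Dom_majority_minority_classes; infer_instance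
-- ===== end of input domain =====

-- B replaces A's four passes (min, max, and two filtering comprehensions) by one fold that
-- maintains the running extremes and both key lists; same O(n) cost, different decomposition.

-- ===== PORT A =====
def majority_minority_classes (counts : List (String × Int)) : List String × List String :=
  if counts = [] then ([], [])
  else
    -- counts is nonempty here, so min?/max? return some; getD 0 never takes the none branch
    let min_cnt : Int := (PySem.List.min? (counts.map Prod.snd) (fun v => v)).getD 0
    let max_cnt : Int := (PySem.List.max? (counts.map Prod.snd) (fun v => v)).getD 0
    ((counts.filter (fun p => p.2 = min_cnt)).map Prod.fst,
     (counts.filter (fun p => p.2 = max_cnt)).map Prod.fst)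

-- ===== PORT B =====
-- the loop body of Source B: state = (min_cnt, max_cnt, mins, maxs)
def altStep (st : Int × Int × List String × List String) (p : String × Int) :
    Int × Int × List String × List String :=
  let mins_mn : List String × Int :=
    if p.2 < st.1 then ([p.1], p.2)
    else if p.2 = st.1 then (st.2.2.1 ++ [p.1], st.1)
    else (st.2.2.1, st.1)
  let maxs_mx : List String × Int :=
    if p.2 > st.2.1 then ([p.1], p.2)
    else if p.2 = st.2.1 then (st.2.2.2 ++ [p.1], st.2.1)
    else (st.2.2.2, st.2.1)
  (mins_mn.2, maxs_mx.2, mins_mn.1, maxs_mx.1)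

def majority_minority_classes_alt (counts : List (String × Int)) : List String × List String :=
  match counts with
  | [] => ([], [])
  | (k0, v0) :: rest =>
    let st := rest.foldl altStep (v0, v0, [k0], [k0])
    (st.2.2.1, st.2.2.2)

-- ===== PRECONDITION & SPEC =====
def Spec_majority_minority_classes (counts : List (String × Int)) (out : List String × List String) : Prop := out = majority_minority_classes_alt counts
instance (counts : List (String × Int)) (out : List String × List String) : Decidable (Spec_majority_minority_classes counts out) := by unfold Spec_majority_minority_classes; infer_instance

-- ===== CLAIM (what is proved, stated in full; the proofs are below) =====
def Claim_equal_majority_minority_classes : Prop := ∀ (counts : List (String × Int)), Dom_majority_minority_classes counts → Spec_majority_minority_classes counts (majority_minority_classes counts)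

-- ===== LEMMAS AND PROOFS =====

-- One step of B's fold on the min half: reset / append / keep equals the filter of p ++ [e]
-- at the new running minimum, provided the old minimum bounds every value in p.
theorem minHalf (p : List (String × Int)) (e : String × Int) (mn : Int)
    (h : ∀ x ∈ p, mn ≤ x.2) :
    (if e.2 < mn then ([e.1], e.2)
     else if e.2 = mn then ((p.filter (fun x => x.2 = mn)).map Prod.fst ++ [e.1], mn)
     else ((p.filter (fun x => x.2 = mn)).map Prod.fst, mn))
    = (((p ++ [e]).filter (fun x => x.2 = min mn e.2)).map Prod.fst, min mn e.2) := by
  rcases lt_trichotomy e.2 mn with hlt | heq | hgt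
  · have hmin : min mn e.2 = e.2 := by omega
    have hfilt : p.filter (fun x => x.2 = e.2) = [] :=
      List.filter_eq_nil_iff.mpr (fun x hx => by have := h x hx; simp; omega)
    simp [hlt, hmin, List.filter_append, hfilt]
  · simp [heq, List.filter_append]
  · have hmin : min mn e.2 = mn := by omega
    have hne : e.2 ≠ mn := by omega
    simp [hne, hmin, List.filter_append]
    omega

-- the symmetric fact for the max half
theorem maxHalf (p : List (String × Int)) (e : String × Int) (mx : Int)
    (h : ∀ x ∈ p, x.2 ≤ mx) :
    (if e.2 > mx then ([e.1], e.2)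
     else if e.2 = mx then ((p.filter (fun x => x.2 = mx)).map Prod.fst ++ [e.1], mx)
     else ((p.filter (fun x => x.2 = mx)).map Prod.fst, mx))
    = (((p ++ [e]).filter (fun x => x.2 = max mx e.2)).map Prod.fst, max mx e.2) := by
  rcases lt_trichotomy mx e.2 with hgt | heq | hlt
  · have hmax : max mx e.2 = e.2 := by omega
    have hfilt : p.filter (fun x => x.2 = e.2) = [] :=
      List.filter_eq_nil_iff.mpr (fun x hx => by have := h x hx; simp; omega)
    simp [hgt, hmax, List.filter_append, hfilt]
  · simp [heq.symm, List.filter_append]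
  · have hmax : max mx e.2 = mx := by omega
    have hne : e.2 ≠ mx := by omega
    simp [hne, hmax, List.filter_append]
    omega

-- Invariant of B's fold: if the state holds the extremes and key lists of a processed
-- prefix p, folding the remaining list l yields those of p ++ l.
theorem altStep_inv (l : List (String × Int)) :
    ∀ (p : List (String × Int)) (mn mx : Int),
    (∀ x ∈ p, mn ≤ x.2) → (∀ x ∈ p, x.2 ≤ mx) →
    l.foldl altStep (mn, mx,
      (p.filter (fun x => x.2 = mn)).map Prod.fst,
      (p.filter (fun x => x.2 = mx)).map Prod.fst)
    = ((l.map Prod.snd).foldl min mn, (l.map Prod.snd).foldl max mx,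
       ((p ++ l).filter (fun x => x.2 = (l.map Prod.snd).foldl min mn)).map Prod.fst,
       ((p ++ l).filter (fun x => x.2 = (l.map Prod.snd).foldl max mx)).map Prod.fst) := by
  induction l with
  | nil => intro p mn mx _ _; simp; exact ⟨rfl, rfl⟩
  | cons e t ih =>
    intro p mn mx hmn hmx
    have hstep : altStep (mn, mx,
        (p.filter (fun x => x.2 = mn)).map Prod.fst,
        (p.filter (fun x => x.2 = mx)).map Prod.fst) e
        = (min mn e.2, max mx e.2,
           ((p ++ [e]).filter (fun x => x.2 = min mn e.2)).map Prod.fst,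
           ((p ++ [e]).filter (fun x => x.2 = max mx e.2)).map Prod.fst) := by
      simp only [altStep]
      rw [minHalf p e mn hmn, maxHalf p e mx hmx]
    have hmn' : ∀ x ∈ p ++ [e], min mn e.2 ≤ x.2 := by
      intro x hx
      rcases List.mem_append.mp hx with hx | hx
      · have := hmn x hx; omega
      · simp at hx; subst hx; omega
    have hmx' : ∀ x ∈ p ++ [e], x.2 ≤ max mx e.2 := by
      intro x hx
      rcases List.mem_append.mp hx with hx | hx
      · have := hmx x hx; omega
      · simp at hx; subst hx; omega
    calc (e :: t).foldl altStep _ = t.foldl altStep (altStep (mn, mx,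
            (p.filter (fun x => x.2 = mn)).map Prod.fst,
            (p.filter (fun x => x.2 = mx)).map Prod.fst) e) := by simp
      _ = _ := by
            rw [hstep, ih (p ++ [e]) (min mn e.2) (max mx e.2) hmn' hmx']
            simp [List.append_assoc]
            exact ⟨rfl, rfl⟩

-- ===== VERDICT (by name: the statement is the Claim_ definition above) =====
theorem majority_minority_classes_spec : Claim_equal_majority_minority_classes := by
  intro counts _
  unfold Spec_majority_minority_classes
  match counts with
  | [] => rfl
  | (k0, v0) :: rest =>
    have hinv := altStep_inv rest [(k0, v0)] v0 v0
      (by intro x hx; simp at hx; subst hx; simp)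
      (by intro x hx; simp at hx; subst hx; simp)
    simp only [List.filter_cons, List.filter_nil, decide_true, if_pos, List.map_cons,
      List.map_nil] at hinv
    simp only [majority_minority_classes, majority_minority_classes_alt]
    rw [if_neg (List.cons_ne_nil _ _)]
    simp only [List.map_cons, PySem.List.min?_id_cons, PySem.List.max?_id_cons,
      Option.getD_some]
    rw [hinv]
    simp
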